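-- pv_equiv track=rewrite | github.com/aciderix/Graph-Systems-Exploration | numerical_semigroups/phases/N7_verify_d9d10.py | verify_kunz_tuple
-- ===== SOURCE A (Python) =====
-- def verify_kunz_tuple(m, kunz):
--     """Verify that a Kunz tuple defines a valid numerical semigroup.
--     Returns (is_valid, n_decomposable, details)."""
--     n = m - 1
--     assert len(kunz) == n
--
--     violations = []
--
--     # Check Kunz conditions
--     for i in range(n):
--         for j in range(i, n):
--             i_res = i + 1
--             j_res = j + 1
--             s = i_res + j_res
--             s_mod = s % m
--
--             if s_mod == 0:
--                 # Sum is multiple of m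
--                 overflow = s // m
--                 # Need k_i + k_j >= overflow
--                 if kunz[i] + kunz[j] < overflow:
--                     violations.append(f"({i_res},{j_res}): {kunz[i]}+{kunz[j]} < {overflow}")
--             else:
--                 t = s_mod - 1  # 0-indexed target
--                 overflow = s // m
--                 # Need k_i + k_j >= k_t + overflow
--                 if kunz[i] + kunz[j] < kunz[t] + overflow:
--                     violations.append(f"({i_res},{j_res}): {kunz[i]}+{kunz[j]} < {kunz[t]}+{overflow}")
--
--     # Count decomposable
--     n_decomp = 0
--     decomp_residues = []
--     for r in range(n):
--         r_res = r + 1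
--         is_decomp = False
--         for i in range(n):
--             i_res = i + 1
--             j_res = (r_res - i_res) % m
--             if j_res == 0:
--                 continue
--             j = j_res - 1
--             overflow = (i_res + j_res) // m
--             if kunz[i] + kunz[j] + overflow == kunz[r]:
--                 is_decomp = True
--                 break
--         if is_decomp:
--             n_decomp += 1
--             decomp_residues.append(r_res)
--
--     is_valid = len(violations) == 0
--     return is_valid, n_decomp, violations, decomp_residues
-- ===== SOURCE B (Python) =====
-- def _violation(m, kunz, i, j):
--     s = i + j + 2
--     s_mod = s % m
--     if s_mod == 0:
--         if kunz[i] + kunz[j] < s // m: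
--             return f"({i+1},{j+1}): {kunz[i]}+{kunz[j]} < {s // m}"
--     else:
--         if kunz[i] + kunz[j] < kunz[s_mod - 1] + s // m:
--             return f"({i+1},{j+1}): {kunz[i]}+{kunz[j]} < {kunz[s_mod - 1]}+{s // m}"
--     return None
--
--
-- def verify_kunz_tuple(m, kunz):
--     """Verify that a Kunz tuple defines a valid numerical semigroup.
--     Returns (is_valid, n_decomposable, details)."""
--     n = m - 1
--     assert len(kunz) == n
--
--     violations = [v for i in range(n) for j in range(i, n)
--                   if (v := _violation(m, kunz, i, j)) is not None]
--
--     # Mark decomposable residues by scattering over all pairs.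
--     decomp = [False] * n
--     for i in range(n):
--         for j in range(n):
--             s = i + j + 2
--             r_res = s % m
--             if r_res != 0 and kunz[i] + kunz[j] + s // m == kunz[r_res - 1]:
--                 decomp[r_res - 1] = True
--
--     decomp_residues = [r + 1 for r in range(n) if decomp[r]]
--     return len(violations) == 0, len(decomp_residues), violations, decomp_residues
-- ===== Notes on version B (the rewrite author's own statement) =====
-- stated objective: alternative
-- what changed: Phase 2's per-residue gather with an early-break inner search is replaced by a scatter over all pairs (i,j) that marks a boolean array of decomposable residues, followed by a single scan; phase 1's violation loop becomes a comprehension over an Option-returning helper.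
import Mathlib
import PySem

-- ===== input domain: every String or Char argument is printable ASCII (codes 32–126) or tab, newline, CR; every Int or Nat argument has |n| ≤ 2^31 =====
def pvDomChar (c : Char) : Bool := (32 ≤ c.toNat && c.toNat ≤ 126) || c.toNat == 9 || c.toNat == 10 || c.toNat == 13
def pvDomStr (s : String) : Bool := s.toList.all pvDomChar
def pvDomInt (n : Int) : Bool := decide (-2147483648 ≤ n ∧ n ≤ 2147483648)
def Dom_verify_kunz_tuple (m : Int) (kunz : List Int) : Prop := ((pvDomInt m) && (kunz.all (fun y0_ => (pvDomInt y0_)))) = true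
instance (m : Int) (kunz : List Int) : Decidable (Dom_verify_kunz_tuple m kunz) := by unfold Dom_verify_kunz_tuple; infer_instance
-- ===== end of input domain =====

-- B replaces phase 2's per-residue search-with-break by a mark-array scatter over all pairs,
-- and phase 1's accumulating loop by a filterMap comprehension (objective: alternative).

-- ===== PORT A =====
-- kunz[i] for an index that is always in range on admitted inputs (Pre_ gives len(kunz) = m-1)
def vkGet (kunz : List Int) (i : Int) : Int := PySem.List.pyGetD kunz i 0

def verify_kunz_tuple (m : Int) (kunz : List Int) : Bool × Int × List String × List Int :=
  let n := m - 1
  let violations : List String :=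
    (PySem.List.pyRange 0 n 1).foldl (fun acc i =>
      (PySem.List.pyRange i n 1).foldl (fun acc2 j =>
        let i_res := i + 1
        let j_res := j + 1
        let s := i_res + j_res
        let s_mod := PySem.Int.mod s m
        if s_mod == 0 then
          let overflow := PySem.Int.floordiv s m
          if vkGet kunz i + vkGet kunz j < overflow then
            acc2 ++ ["(" ++ PySem.Int.toStr i_res ++ "," ++ PySem.Int.toStr j_res ++ "): " ++
                     PySem.Int.toStr (vkGet kunz i) ++ "+" ++ PySem.Int.toStr (vkGet kunz j) ++
                     " < " ++ PySem.Int.toStr overflow]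
          else acc2
        else
          let t := s_mod - 1
          let overflow := PySem.Int.floordiv s m
          if vkGet kunz i + vkGet kunz j < vkGet kunz t + overflow then
            acc2 ++ ["(" ++ PySem.Int.toStr i_res ++ "," ++ PySem.Int.toStr j_res ++ "): " ++
                     PySem.Int.toStr (vkGet kunz i) ++ "+" ++ PySem.Int.toStr (vkGet kunz j) ++
                     " < " ++ PySem.Int.toStr (vkGet kunz t) ++ "+" ++ PySem.Int.toStr overflow]
          else acc2) acc) []
  let st : Int × List Int :=
    (PySem.List.pyRange 0 n 1).foldl (fun st r =>
      let r_res := r + 1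
      let is_decomp := (PySem.List.pyRange 0 n 1).any (fun i =>
        let i_res := i + 1
        let j_res := PySem.Int.mod (r_res - i_res) m
        if j_res == 0 then false
        else
          let j := j_res - 1
          let overflow := PySem.Int.floordiv (i_res + j_res) m
          vkGet kunz i + vkGet kunz j + overflow == vkGet kunz r)
      if is_decomp then (st.1 + 1, st.2 ++ [r_res]) else st) (0, [])
  (violations.length == 0, st.1, violations, st.2)

-- ===== PORT B =====
def vkViolation (m : Int) (kunz : List Int) (i j : Int) : Option String :=
  let s := i + j + 2
  let s_mod := PySem.Int.mod s m
  if s_mod == 0 then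
    if vkGet kunz i + vkGet kunz j < PySem.Int.floordiv s m then
      some ("(" ++ PySem.Int.toStr (i + 1) ++ "," ++ PySem.Int.toStr (j + 1) ++ "): " ++
            PySem.Int.toStr (vkGet kunz i) ++ "+" ++ PySem.Int.toStr (vkGet kunz j) ++
            " < " ++ PySem.Int.toStr (PySem.Int.floordiv s m))
    else none
  else
    if vkGet kunz i + vkGet kunz j < vkGet kunz (s_mod - 1) + PySem.Int.floordiv s m then
      some ("(" ++ PySem.Int.toStr (i + 1) ++ "," ++ PySem.Int.toStr (j + 1) ++ "): " ++
            PySem.Int.toStr (vkGet kunz i) ++ "+" ++ PySem.Int.toStr (vkGet kunz j) ++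
            " < " ++ PySem.Int.toStr (vkGet kunz (s_mod - 1)) ++ "+" ++
            PySem.Int.toStr (PySem.Int.floordiv s m))
    else none

def verify_kunz_tuple_alt (m : Int) (kunz : List Int) : Bool × Int × List String × List Int :=
  let n := m - 1
  let violations : List String :=
    (PySem.List.pyRange 0 n 1).flatMap (fun i =>
      (PySem.List.pyRange i n 1).filterMap (fun j => vkViolation m kunz i j))
  let decomp : List Bool :=
    (PySem.List.pyRange 0 n 1).foldl (fun d i =>
      (PySem.List.pyRange 0 n 1).foldl (fun d2 j =>
        let s := i + j + 2
        let r_res := PySem.Int.mod s m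
        if r_res != 0 &&
           (vkGet kunz i + vkGet kunz j + PySem.Int.floordiv s m == vkGet kunz (r_res - 1)) then
          d2.set (r_res - 1).toNat true
        else d2) d) (List.replicate n.toNat false)
  let decomp_residues : List Int :=
    ((PySem.List.pyRange 0 n 1).filter (fun r => decomp.getD r.toNat false)).map (fun r => r + 1)
  (violations.length == 0, (decomp_residues.length : Int), violations, decomp_residues)

-- ===== PRECONDITION & SPEC =====
-- A asserts len(kunz) == m - 1 and raises AssertionError otherwise; Pre_ admits exactly the asserted shape.
def Pre_verify_kunz_tuple (m : Int) (kunz : List Int) : Prop := (kunz.length : Int) = m - 1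
instance (m : Int) (kunz : List Int) : Decidable (Pre_verify_kunz_tuple m kunz) := by unfold Pre_verify_kunz_tuple; infer_instance
def pvWitness_verify_kunz_tuple : Int × List Int := (3, [2, 1])

def Spec_verify_kunz_tuple (m : Int) (kunz : List Int) (out : Bool × Int × List String × List Int) : Prop := out = verify_kunz_tuple_alt m kunz
instance (m : Int) (kunz : List Int) (out : Bool × Int × List String × List Int) : Decidable (Spec_verify_kunz_tuple m kunz out) := by unfold Spec_verify_kunz_tuple; infer_instance

-- ===== CLAIM (what is proved, stated in full; the proofs are below) =====
def Claim_equal_verify_kunz_tuple : Prop := ∀ (m : Int) (kunz : List Int), Dom_verify_kunz_tuple m kunz → Pre_verify_kunz_tuple m kunz → Spec_verify_kunz_tuple m kunz (verify_kunz_tuple m kunz)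

-- ===== LEMMAS AND PROOFS =====

-- appending an optional element ≡ filterMap
lemma vk_foldl_opt {α β : Type} (f : α → Option β) :
    ∀ (l : List α) (acc : List β),
      l.foldl (fun a x => a ++ (f x).toList) acc = acc ++ l.filterMap f := by
  intro l
  induction l with
  | nil => intro acc; simp
  | cons x l ih =>
    intro acc
    cases hfx : f x <;> simp [List.foldl_cons, ih, hfx]

-- A's inner phase-1 step appends exactly the optional violation of B's helper
lemma vk_stepA (m : Int) (kunz : List Int) (i : Int) (acc2 : List String) (j : Int) :
    (let i_res := i + 1
     let j_res := j + 1
     let s := i_res + j_res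
     let s_mod := PySem.Int.mod s m
     if s_mod == 0 then
       let overflow := PySem.Int.floordiv s m
       if vkGet kunz i + vkGet kunz j < overflow then
         acc2 ++ ["(" ++ PySem.Int.toStr i_res ++ "," ++ PySem.Int.toStr j_res ++ "): " ++
                  PySem.Int.toStr (vkGet kunz i) ++ "+" ++ PySem.Int.toStr (vkGet kunz j) ++
                  " < " ++ PySem.Int.toStr overflow]
       else acc2
     else
       let t := s_mod - 1
       let overflow := PySem.Int.floordiv s m
       if vkGet kunz i + vkGet kunz j < vkGet kunz t + overflow then
         acc2 ++ ["(" ++ PySem.Int.toStr i_res ++ "," ++ PySem.Int.toStr j_res ++ "): " ++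
                  PySem.Int.toStr (vkGet kunz i) ++ "+" ++ PySem.Int.toStr (vkGet kunz j) ++
                  " < " ++ PySem.Int.toStr (vkGet kunz t) ++ "+" ++ PySem.Int.toStr overflow]
       else acc2)
    = acc2 ++ (vkViolation m kunz i j).toList := by
  show (if PySem.Int.mod (i + 1 + (j + 1)) m == 0 then _ else _) = _
  rw [show i + 1 + (j + 1) = i + j + 2 by ring]
  unfold vkViolation
  simp only [beq_iff_eq]
  split_ifs <;> simp

-- phase 1: the accumulating double loop equals the flatMap/filterMap comprehension
lemma vk_phase1 (m : Int) (kunz : List Int) (n : Int) :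
    ∀ (l : List Int) (acc : List String),
      l.foldl (fun acc i =>
        (PySem.List.pyRange i n 1).foldl (fun acc2 j =>
          acc2 ++ (vkViolation m kunz i j).toList) acc) acc
      = acc ++ l.flatMap (fun i => (PySem.List.pyRange i n 1).filterMap (vkViolation m kunz i)) := by
  intro l
  induction l with
  | nil => intro acc; simp
  | cons x l ih =>
    intro acc
    rw [List.foldl_cons, ih, vk_foldl_opt, List.flatMap_cons, List.append_assoc]

-- phase-2 gather loop of A: count-and-append fold in closed form
lemma vk_gather (p : Int → Bool) :
    ∀ (l : List Int) (c : Int) (acc : List Int),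
      l.foldl (fun st r => if p r then (st.1 + 1, st.2 ++ [r + 1]) else st) (c, acc)
      = (c + ((l.filter p).length : Int), acc ++ (l.filter p).map (fun r => r + 1)) := by
  intro l
  induction l with
  | nil => intro c acc; simp
  | cons x l ih =>
    intro c acc
    by_cases hx : p x = true
    · simp only [List.foldl_cons, hx, if_pos, List.filter_cons_of_pos hx, ih]
      simp only [Prod.mk.injEq]
      refine ⟨by simp [List.length_cons]; omega, by simp⟩
    · simp only [List.foldl_cons, List.filter_cons_of_neg hx, ih]
      rw [if_neg (by simp [hx])]

-- nested fold over two ranges = fold over the pair list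
lemma vk_nested_foldl {α : Type} (g : α → Int → Int → α) :
    ∀ (l1 : List Int) (l2 : List Int) (d : α),
      l1.foldl (fun d i => l2.foldl (fun d2 j => g d2 i j) d) d
      = (l1.flatMap (fun i => l2.map (fun j => (i, j)))).foldl (fun d p => g d p.1 p.2) d := by
  intro l1
  induction l1 with
  | nil => intro l2 d; simp
  | cons x l ih => intro l2 d; simp [List.foldl_append, List.foldl_map, ih]

lemma vk_set_getD (d : List Bool) (i k : Nat) (hi : i < d.length) :
    (d.set i true).getD k false = (d.getD k false || (i == k)) := by
  rw [List.getD_eq_getElem?_getD, List.getD_eq_getElem?_getD, List.getElem?_set]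
  by_cases h : i = k
  · subst h; simp [hi]
  · simp [h]

-- scatter fold: the mark array reads back as an existential over the scattered list
lemma vk_scatter {α : Type} (q : α → Bool) (idx : α → Nat) :
    ∀ (l : List α) (d : List Bool) (k : Nat),
      (∀ x, q x = true → idx x < d.length) →
      ((l.foldl (fun d x => if q x then d.set (idx x) true else d) d).getD k false)
      = (d.getD k false || l.any (fun x => q x && (idx x == k))) := by
  intro l
  induction l with
  | nil => intro d k _; simp
  | cons x l ih =>
    intro d k hlt
    by_cases hx : q x = true
    · simp only [List.foldl_cons, hx, if_pos, List.any_cons, Bool.true_and]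
      rw [ih _ k (fun y hy => by rw [List.length_set]; exact hlt y hy),
          vk_set_getD d (idx x) k (hlt x hx), Bool.or_assoc]
    · simp only [List.foldl_cons, List.any_cons]
      rw [if_neg (by simp [hx]), ih _ k hlt]
      simp [hx]

-- the violation list both ports compute
def vkV (m : Int) (kunz : List Int) : List String :=
  (PySem.List.pyRange 0 (m-1) 1).flatMap (fun i =>
    (PySem.List.pyRange i (m-1) 1).filterMap (vkViolation m kunz i))

-- A's inner decomposability test for residue r at index i (zeta-reduced body of the any)
def vkCondA (m : Int) (kunz : List Int) (r i : Int) : Bool :=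
  if PySem.Int.mod (r + 1 - (i + 1)) m == 0 then false
  else vkGet kunz i + vkGet kunz (PySem.Int.mod (r + 1 - (i + 1)) m - 1) +
       PySem.Int.floordiv (i + 1 + PySem.Int.mod (r + 1 - (i + 1)) m) m == vkGet kunz r

def vkPA (m : Int) (kunz : List Int) (r : Int) : Bool :=
  (PySem.List.pyRange 0 (m-1) 1).any (vkCondA m kunz r)

-- B's mark condition and mark index for the pair (i, j)
def vkQ (m : Int) (kunz : List Int) (i j : Int) : Bool :=
  PySem.Int.mod (i + j + 2) m != 0 &&
  (vkGet kunz i + vkGet kunz j + PySem.Int.floordiv (i + j + 2) m ==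
   vkGet kunz (PySem.Int.mod (i + j + 2) m - 1))

def vkIdx (m i j : Int) : Nat := (PySem.Int.mod (i + j + 2) m - 1).toNat

lemma vkA_closed (m : Int) (kunz : List Int) :
    verify_kunz_tuple m kunz
    = ((vkV m kunz).length == 0,
       (((PySem.List.pyRange 0 (m-1) 1).filter (vkPA m kunz)).length : Int),
       vkV m kunz,
       ((PySem.List.pyRange 0 (m-1) 1).filter (vkPA m kunz)).map (fun r => r + 1)) := by
  unfold verify_kunz_tuple vkV vkPA vkCondA
  dsimp only
  simp only [vk_stepA]
  rw [vk_phase1]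
  simp only [vk_gather]
  simp

-- a pair satisfying the mark condition marks an index inside the array
lemma vk_idx_lt (m : Int) (kunz : List Int) (i j : Int) (hm : 0 < m)
    (hq : vkQ m kunz i j = true) : vkIdx m i j < (m-1).toNat := by
  unfold vkQ at hq
  unfold vkIdx
  rw [PySem.Int.mod_eq_emod_of_pos hm] at hq ⊢
  have h1 : 0 ≤ (i + j + 2) % m := Int.emod_nonneg _ (by omega)
  have h2 : (i + j + 2) % m < m := Int.emod_lt_of_pos _ hm
  have h3 : (i + j + 2) % m ≠ 0 := by
    intro h
    simp [h] at hq
  omega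

-- reading the scattered mark array at r is the existential over marking pairs
lemma vk_decomp_getD (m : Int) (kunz : List Int) (hm : 0 < m) (r : Int) :
    ((PySem.List.pyRange 0 (m-1) 1).foldl (fun d i =>
        (PySem.List.pyRange 0 (m-1) 1).foldl (fun d2 j =>
          if vkQ m kunz i j then d2.set (vkIdx m i j) true else d2) d)
      (List.replicate (m-1).toNat false)).getD r.toNat false
    = (PySem.List.pyRange 0 (m-1) 1).any (fun i =>
        (PySem.List.pyRange 0 (m-1) 1).any (fun j =>
          vkQ m kunz i j && (vkIdx m i j == r.toNat))) := by
  rw [vk_nested_foldl]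
  have hb : ∀ x : Int × Int, (fun p : Int × Int => vkQ m kunz p.1 p.2) x = true →
      (fun p : Int × Int => vkIdx m p.1 p.2) x < (List.replicate (m-1).toNat false).length := by
    intro x hx
    rw [List.length_replicate]
    exact vk_idx_lt m kunz x.1 x.2 hm hx
  rw [vk_scatter (fun p : Int × Int => vkQ m kunz p.1 p.2) (fun p : Int × Int => vkIdx m p.1 p.2)
      _ _ _ hb]
  rw [List.any_flatMap]
  simp [List.getD_eq_getElem?_getD, List.any_map, Function.comp_def]

lemma vkB_closed (m : Int) (kunz : List Int) (hm : 0 < m) :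
    verify_kunz_tuple_alt m kunz
    = ((vkV m kunz).length == 0,
       ((((PySem.List.pyRange 0 (m-1) 1).filter (fun r =>
            (PySem.List.pyRange 0 (m-1) 1).any (fun i =>
              (PySem.List.pyRange 0 (m-1) 1).any (fun j =>
                vkQ m kunz i j && (vkIdx m i j == r.toNat))))).map (fun r => r + 1)).length : Int),
       vkV m kunz,
       ((PySem.List.pyRange 0 (m-1) 1).filter (fun r =>
          (PySem.List.pyRange 0 (m-1) 1).any (fun i =>
            (PySem.List.pyRange 0 (m-1) 1).any (fun j =>
              vkQ m kunz i j && (vkIdx m i j == r.toNat))))).map (fun r => r + 1)) := by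
  unfold verify_kunz_tuple_alt vkV
  dsimp only
  simp only [Prod.mk.injEq]
  refine ⟨trivial, ?_, trivial, ?_⟩
  · refine congrArg (fun l : List Int => ((l.length : Nat) : Int)) ?_
    refine congrArg (List.map (fun r => r + 1)) ?_
    refine List.filter_congr ?_
    intro r hr
    exact vk_decomp_getD m kunz hm r
  · refine congrArg (List.map (fun r => r + 1)) ?_
    refine List.filter_congr ?_
    intro r hr
    exact vk_decomp_getD m kunz hm r

-- jr = (r-i) mod m recovers j+1 when r is the residue marked by the pair (i, j)
lemma vk_arith1 (m i j r : Int) (hj0 : 0 ≤ j) (hjn : j < m - 1)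
    (hrr : (i + j + 2) % m - 1 = r) : (r + 1 - (i + 1)) % m = j + 1 := by
  have hd := Int.emod_def (i + j + 2) m
  have h1 : r + 1 - (i + 1) = (j + 1) + m * (-((i + j + 2) / m)) := by
    rw [hd] at hrr; linarith
  rw [h1, Int.add_mul_emod_self_left]
  exact Int.emod_eq_of_lt (by omega) (by omega)

-- the pair (i, jr-1) marks residue r when A finds jr = (r-i) mod m ≠ 0
lemma vk_arith2 (m i r : Int) (hr0 : 0 ≤ r) (hrn : r < m - 1) :
    (i + ((r + 1 - (i + 1)) % m - 1) + 2) % m = r + 1 := by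
  have h1 : i + ((r + 1 - (i + 1)) % m - 1) + 2
      = (r + 1) + m * (-((r + 1 - (i + 1)) / m)) := by
    rw [Int.emod_def]; ring
  rw [h1, Int.add_mul_emod_self_left]
  exact Int.emod_eq_of_lt (by omega) (by omega)

-- existence over A's gather at r ≡ existence of a marking pair for r
lemma vk_mark_iff (m : Int) (kunz : List Int) (hm : 0 < m) (r : Int)
    (hr0 : 0 ≤ r) (hrn : r < m - 1) :
    vkPA m kunz r
    = (PySem.List.pyRange 0 (m-1) 1).any (fun i =>
        (PySem.List.pyRange 0 (m-1) 1).any (fun j =>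
          vkQ m kunz i j && (vkIdx m i j == r.toNat))) := by
  rw [Bool.eq_iff_iff]
  simp only [vkPA, vkCondA, vkQ, vkIdx, List.any_eq_true, PySem.List.mem_pyRange_one,
    Bool.and_eq_true, bne_iff_ne, beq_iff_eq, ne_eq]
  constructor
  · rintro ⟨i, ⟨hi0, hin⟩, hc⟩
    by_cases hz : PySem.Int.mod (r + 1 - (i + 1)) m = 0
    · rw [if_pos hz] at hc
      exact absurd hc (by simp)
    · rw [if_neg hz, beq_iff_eq] at hc
      rw [PySem.Int.mod_eq_emod_of_pos hm] at hc hz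
      have hb1 : 0 ≤ (r + 1 - (i + 1)) % m := Int.emod_nonneg _ (by omega)
      have hb2 : (r + 1 - (i + 1)) % m < m := Int.emod_lt_of_pos _ hm
      have hkey : (i + ((r + 1 - (i + 1)) % m - 1) + 2) % m = r + 1 := vk_arith2 m i r hr0 hrn
      refine ⟨i, ⟨hi0, hin⟩, (r + 1 - (i + 1)) % m - 1, ⟨by omega, by omega⟩, ⟨?_, ?_⟩, ?_⟩
      · rw [PySem.Int.mod_eq_emod_of_pos hm, hkey]
        omega
      · rw [PySem.Int.mod_eq_emod_of_pos hm, hkey, show r + 1 - 1 = r by ring,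
            show i + ((r + 1 - (i + 1)) % m - 1) + 2 = i + 1 + (r + 1 - (i + 1)) % m by ring]
        exact hc
      · rw [PySem.Int.mod_eq_emod_of_pos hm, hkey]
        omega
  · rintro ⟨i, ⟨hi0, hin⟩, j, ⟨hj0, hjn⟩, ⟨hne, heq⟩, hidx⟩
    rw [PySem.Int.mod_eq_emod_of_pos hm] at hne heq hidx
    have hb1 : 0 ≤ (i + j + 2) % m := Int.emod_nonneg _ (by omega)
    have hb2 : (i + j + 2) % m < m := Int.emod_lt_of_pos _ hm
    have hrr : (i + j + 2) % m - 1 = r := by omega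
    have hjr : (r + 1 - (i + 1)) % m = j + 1 := vk_arith1 m i j r hj0 hjn hrr
    refine ⟨i, ⟨hi0, hin⟩, ?_⟩
    have hz : ¬ PySem.Int.mod (r + 1 - (i + 1)) m = 0 := by
      rw [PySem.Int.mod_eq_emod_of_pos hm, hjr]
      omega
    rw [if_neg hz, beq_iff_eq, PySem.Int.mod_eq_emod_of_pos hm, hjr,
        show j + 1 - 1 = j by ring, show i + 1 + (j + 1) = i + j + 2 by ring, ← hrr]
    exact heq

-- ===== VERDICT (by name: the statement is the Claim_ definition above) =====
theorem verify_kunz_tuple_spec : Claim_equal_verify_kunz_tuple := by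
  intro m kunz _ hpre
  have hlen : (kunz.length : Int) = m - 1 := hpre
  have hm : 0 < m := by omega
  show verify_kunz_tuple m kunz = verify_kunz_tuple_alt m kunz
  rw [vkA_closed, vkB_closed m kunz hm]
  have hfil : (PySem.List.pyRange 0 (m-1) 1).filter (vkPA m kunz)
      = (PySem.List.pyRange 0 (m-1) 1).filter (fun r =>
          (PySem.List.pyRange 0 (m-1) 1).any (fun i =>
            (PySem.List.pyRange 0 (m-1) 1).any (fun j =>
              vkQ m kunz i j && (vkIdx m i j == r.toNat)))) := by
    apply List.filter_congr
    intro r hr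
    rw [PySem.List.mem_pyRange_one] at hr
    exact vk_mark_iff m kunz hm r hr.1 hr.2
  rw [hfil]
  simp
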